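-- pv_equiv track=rewrite | github.com/luna-data/2025_Python_2 | mid_term_test_study/중간재시용/상속클래스.py | is_valid_course_code
-- ===== SOURCE A (Python) =====
-- def is_valid_course_code(code: str) -> bool:
--     # "대문자 2~4 + 숫자 3" 패턴을 수작업 검사
--     if len(code) < 5:
--         return False
--     # 앞에서부터 대문자 연속 구간 길이 확인
--     i = 0
--     while i < len(code) and 'A' <= code[i] <= 'Z':
--         i += 1
--     letters = i
--     digits = len(code) - i
--     if not (2 <= letters <= 4):
--         return False
--     if digits != 3:
--         return False
--     # 남은 3글자가 모두 숫자인지 확인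
--     for ch in code[i:]:
--         if not ('0' <= ch <= '9'):
--             return False
--     return True
-- ===== SOURCE B (Python) =====
-- def is_valid_course_code(code: str) -> bool:
--     # slice off the last 3 chars; head must be 2-4 uppercase letters, tail 3 digits
--     head, tail = code[:-3], code[-3:]
--     return 2 <= len(head) <= 4 and head.isalpha() and head == head.upper() and tail.isdigit()
-- ===== Notes on version B (the rewrite author's own statement) =====
-- stated objective: idiomatic
-- what changed: B replaces A's manual leading-uppercase-run scan plus per-character digit loop by slicing the string into code[:-3] and code[-3:] and testing them with whole-string predicates (len, isalpha, == .upper(), isdigit).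
import Mathlib
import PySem

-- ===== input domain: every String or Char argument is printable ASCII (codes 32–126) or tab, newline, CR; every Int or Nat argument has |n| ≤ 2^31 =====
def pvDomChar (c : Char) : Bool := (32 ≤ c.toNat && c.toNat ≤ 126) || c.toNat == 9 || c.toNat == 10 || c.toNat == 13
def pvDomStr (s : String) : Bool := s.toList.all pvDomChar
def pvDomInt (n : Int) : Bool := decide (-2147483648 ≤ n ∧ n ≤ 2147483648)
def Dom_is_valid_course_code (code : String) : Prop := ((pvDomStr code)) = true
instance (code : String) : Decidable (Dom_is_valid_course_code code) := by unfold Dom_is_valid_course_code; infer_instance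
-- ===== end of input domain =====

-- B replaces A's manual leading-run scan and per-character suffix loop by slicing off the
-- last 3 characters and using whole-string predicates (len/isalpha/upper/isdigit); objective: idiomatic.

-- ===== PORT A =====
-- A's while loop counting the leading 'A'..'Z' run
def pvRunA : List Char → Nat
  | [] => 0
  | c :: cs => if 'A' ≤ c ∧ c ≤ 'Z' then pvRunA cs + 1 else 0

def is_valid_course_code (code : String) : Bool :=
  let cs := code.toList
  if cs.length < 5 then false
  else
    let i := pvRunA cs
    let letters := i
    let digits : Int := (cs.length : Int) - (i : Int)
    if ¬ (2 ≤ letters ∧ letters ≤ 4) then false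
    else if digits ≠ 3 then false
    else (cs.drop i).all (fun ch => decide ('0' ≤ ch) && decide (ch ≤ '9'))
    -- code[i:] with 0 ≤ i ≤ len(code) is exactly List.drop i; the for-loop with its
    -- early 'return False' is List.all

-- ===== PORT B =====
def is_valid_course_code_alt (code : String) : Bool :=
  let head := PySem.Str.slice code none (some (-3))
  let tail := PySem.Str.slice code (some (-3)) none
  decide (2 ≤ PySem.Str.len head) && decide (PySem.Str.len head ≤ 4)
    && PySem.Str.strIsalpha head && (head == PySem.Str.upper head)
    && PySem.Str.strIsdigit tail

-- ===== PRECONDITION & SPEC =====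
def Spec_is_valid_course_code (code : String) (out : Bool) : Prop := out = is_valid_course_code_alt code
instance (code : String) (out : Bool) : Decidable (Spec_is_valid_course_code code out) := by unfold Spec_is_valid_course_code; infer_instance

-- ===== CLAIM (what is proved, stated in full; the proofs are below) =====
def Claim_equal_is_valid_course_code : Prop := ∀ (code : String), Dom_is_valid_course_code code → Spec_is_valid_course_code code (is_valid_course_code code)

-- ===== LEMMAS AND PROOFS =====

theorem pv_char_le_iff (a b : Char) : a ≤ b ↔ a.toNat ≤ b.toNat := by
  rw [Char.le_def, UInt32.le_iff_toNat_le]; rfl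

theorem pvRunA_le (cs : List Char) : pvRunA cs ≤ cs.length := by
  induction cs with
  | nil => simp [pvRunA]
  | cons c cs ih => by_cases h : 'A' ≤ c ∧ c ≤ 'Z' <;> simp [pvRunA, h] <;> omega

theorem pvRunA_take (cs : List Char) :
    ∀ x ∈ cs.take (pvRunA cs), 'A' ≤ x ∧ x ≤ 'Z' := by
  induction cs with
  | nil => simp [pvRunA]
  | cons c cs ih =>
    by_cases h : 'A' ≤ c ∧ c ≤ 'Z'
    · simp only [pvRunA, if_pos h, List.take_succ_cons]
      intro x hx
      rcases List.mem_cons.mp hx with rfl | hx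
      · exact h
      · exact ih x hx
    · simp [pvRunA, h]

theorem pvRunA_eq_of (cs : List Char) (k : Nat) (hk : k ≤ cs.length)
    (h1 : ∀ x ∈ cs.take k, 'A' ≤ x ∧ x ≤ 'Z')
    (h2 : ∀ c, cs[k]? = some c → ¬ ('A' ≤ c ∧ c ≤ 'Z')) :
    pvRunA cs = k := by
  induction cs generalizing k with
  | nil =>
    simp at hk
    simp [pvRunA, hk]
  | cons c cs ih =>
    cases k with
    | zero =>
      have h := h2 c (by simp)
      simp [pvRunA, h]
    | succ k =>
      have hc : 'A' ≤ c ∧ c ≤ 'Z' := h1 c (by simp)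
      simp only [pvRunA, if_pos hc, Nat.add_right_cancel_iff]
      refine ih k (by simpa using hk) ?_ ?_
      · intro x hx; exact h1 x (by simp [hx])
      · intro d hd; exact h2 d (by simpa using hd)

theorem pv_upper_not_lower (c : Char) (h : c ≤ 'Z') : PySem.Chars.islower c = false := by
  simp only [PySem.Chars.islower, Bool.and_eq_false_iff, decide_eq_false_iff_not]
  left
  intro hl
  rw [pv_char_le_iff] at h hl
  have h1 : ('a').toNat = 97 := rfl
  have h2 : ('Z').toNat = 90 := rfl
  omega

theorem pv_map_upper (cs : List Char) (h : ∀ x ∈ cs, 'A' ≤ x ∧ x ≤ 'Z') :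
    cs.map PySem.Chars.upperChar = cs := by
  induction cs with
  | nil => simp
  | cons c cs ih =>
    have hc := h c (by simp)
    simp only [List.map_cons, List.cons.injEq]
    constructor
    · simp [PySem.Chars.upperChar, pv_upper_not_lower c hc.2]
    · exact ih (fun x hx => h x (by simp [hx]))

theorem pv_fix_of_map_eq (cs : List Char) (f : Char → Char) (h : cs.map f = cs) :
    ∀ x ∈ cs, f x = x := by
  induction cs with
  | nil => simp
  | cons c cs ih =>
    simp only [List.map_cons, List.cons.injEq] at h
    intro x hx
    rcases List.mem_cons.mp hx with rfl | hx
    · exact h.1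
    · exact ih h.2 x hx

theorem pv_upper_of_alpha_fixed (c : Char)
    (ha : PySem.Chars.isalpha c = true)
    (hf : PySem.Chars.upperChar c = c) : 'A' ≤ c ∧ c ≤ 'Z' := by
  simp only [PySem.Chars.isalpha, Bool.or_eq_true] at ha
  rcases ha with h | h
  · simp only [PySem.Chars.isupper, Bool.and_eq_true, decide_eq_true_eq] at h
    exact h
  · exfalso
    simp only [PySem.Chars.islower, Bool.and_eq_true, decide_eq_true_eq] at h
    have hb1 : 97 ≤ c.toNat := by have := h.1; rw [pv_char_le_iff] at this; exact this
    have hb2 : c.toNat ≤ 122 := by have := h.2; rw [pv_char_le_iff] at this; exact this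
    have hlow : PySem.Chars.islower c = true := by
      simp only [PySem.Chars.islower, Bool.and_eq_true, decide_eq_true_eq]; exact h
    have hval : (c.toNat - 32).isValidChar := by constructor <;> omega
    have : (PySem.Chars.upperChar c).toNat = c.toNat - 32 := by
      simp only [PySem.Chars.upperChar, if_pos hlow, Char.ofNat, dif_pos hval]
      rfl
    rw [hf] at this
    omega

theorem pv_digit_not_upper (c : Char) (h : '0' ≤ c ∧ c ≤ '9') : ¬ ('A' ≤ c ∧ c ≤ 'Z') := by
  rintro ⟨hA, _⟩
  have := le_trans hA h.2
  exact absurd this (by decide)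

theorem A_iff (code : String) : is_valid_course_code code = true ↔
    (¬ code.toList.length < 5 ∧ 2 ≤ pvRunA code.toList ∧ pvRunA code.toList ≤ 4 ∧
     (code.toList.length : Int) - (pvRunA code.toList : Int) = 3 ∧
     ∀ x ∈ code.toList.drop (pvRunA code.toList), '0' ≤ x ∧ x ≤ '9') := by
  simp only [is_valid_course_code]
  by_cases h1 : code.toList.length < 5
  · rw [if_pos h1]
    constructor
    · intro h; simp at h
    · rintro ⟨h5, _⟩; exact absurd h1 h5
  · rw [if_neg h1]
    by_cases h2 : 2 ≤ pvRunA code.toList ∧ pvRunA code.toList ≤ 4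
    · rw [if_neg (not_not_intro h2)]
      by_cases h3 : (code.toList.length : Int) - (pvRunA code.toList : Int) = 3
      · rw [if_neg (not_not_intro h3)]
        simp only [List.all_eq_true, Bool.and_eq_true, decide_eq_true_eq]
        exact ⟨fun h => ⟨h1, h2.1, h2.2, h3, fun x hx => h x hx⟩,
               fun h x hx => h.2.2.2.2 x hx⟩
      · rw [if_pos h3]
        constructor
        · intro h; simp at h
        · rintro ⟨_, _, _, hc, _⟩; exact (h3 hc).elim
    · rw [if_pos h2]
      constructor
      · intro h; simp at h
      · rintro ⟨_, ha, hb, _⟩; exact (h2 ⟨ha, hb⟩).elim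

theorem main_equiv (code : String) :
    is_valid_course_code code = is_valid_course_code_alt code := by
  have hcs : code.toList.length = code.length := by simp
  rw [Bool.eq_iff_iff, A_iff]
  unfold is_valid_course_code_alt
  simp [PySem.Str.slice, PySem.Str.len, PySem.Str.strIsalpha, PySem.Str.strIsdigit,
        PySem.Str.upper, PySem.List.slice, PySem.Chars.strIsalpha,
        PySem.Chars.strIsdigit, PySem.Chars.isdigit]
  constructor
  · rintro ⟨h5, h2, h4, h3, hd⟩
    have hle := pvRunA_le code.toList
    have hrr : pvRunA code.toList = code.length - 3 := by omega
    rw [hrr] at hd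
    have hupper := pvRunA_take code.toList
    rw [hrr] at hupper
    refine ⟨⟨⟨⟨by omega, by omega⟩, ⟨by omega, ?_⟩, ?_⟩, ?_⟩, ⟨by omega, by omega⟩, ?_⟩
    · intro he
      rw [he] at h5
      simp at h5
    · intro x hx
      have hx' := hupper x hx
      simp only [PySem.Chars.isalpha, PySem.Chars.isupper, Bool.or_eq_true, Bool.and_eq_true,
        decide_eq_true_eq]
      exact Or.inl ⟨hx'.1, hx'.2⟩
    · simp only [PySem.Chars.upper]
      exact congrArg String.ofList (pv_map_upper _ hupper).symm
    · intro x hx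
      exact hd x (List.mem_of_mem_take hx)
  · rintro ⟨⟨⟨⟨h2, h7⟩, ⟨hn0, hne⟩, halpha⟩, hfix⟩, ⟨hd0, hpos⟩, hdig⟩
    have h5 : 5 ≤ code.length := by omega
    have hfix' : (code.toList.take (code.length - 3)).map PySem.Chars.upperChar =
        code.toList.take (code.length - 3) := by
      have := congrArg String.toList hfix
      simp only [String.toList_ofList, PySem.Chars.upper] at this
      exact this.symm
    have hup : ∀ x ∈ code.toList.take (code.length - 3), 'A' ≤ x ∧ x ≤ 'Z' := by
      intro x hx
      exact pv_upper_of_alpha_fixed x (halpha x hx) (pv_fix_of_map_eq _ _ hfix' x hx)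
    have hTD : code.length - (code.length - 3) = (code.toList.drop (code.length - 3)).length := by
      simp [hcs]
    rw [hTD, List.take_length] at hdig
    have hrr : pvRunA code.toList = code.length - 3 := by
      apply pvRunA_eq_of _ _ (by omega) hup
      intro c hc
      apply pv_digit_not_upper
      apply hdig
      have hh : (List.drop (code.length - 3) code.toList).head? =
          code.toList[code.length - 3]? := List.head?_drop
      rw [hc] at hh
      exact List.mem_of_mem_head? (by rw [hh]; rfl)
    refine ⟨h5, by omega, by omega, by rw [hrr]; omega, by rw [hrr]; exact hdig⟩

-- ===== VERDICT (by name: the statement is the Claim_ definition above) =====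
theorem is_valid_course_code_spec : Claim_equal_is_valid_course_code := by
  intro code _
  unfold Spec_is_valid_course_code
  exact main_equiv code
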